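-- pv_equiv track=rewrite | github.com/SClear-UVM2024-Projects/OOP_GitHub_Repository_Cloud_Database | query.py | format_output_docs
-- ===== SOURCE A (Python) =====
-- def format_output_docs(doc_names: list) -> str:
--     """ format_output_docs simply takes a list of firbase document names and returns a clear and
--     formatted list of those names. """
--
--     # Create output string
--     out_string = "-" * 10 + "DOCUMENT NAMES" + "-" * 10 + "\n"
--
--     # Iterate through all the objects in the list
--     for i in range(len(doc_names)):
--         # Grab the document name at the current position
--         doc_name = doc_names[i]
--
--         # Check if it's a string (no reason for it not to be)
--         if not isinstance(doc_name, str):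
--             return "NOPE"  # Deliver some kind of message if it isn't a string
--         else:
--             # Add it to a formatted output string
--             out_string += "DOC " + str(i + 1) + ": " + doc_name + "\n"
--
--     # Return the formatted output
--     return out_string
-- ===== SOURCE B (Python) =====
-- def format_output_docs(doc_names: list) -> str:
--     """Divide-and-conquer: the body for a segment is the concatenation of the bodies of its
--     two halves; a non-string anywhere propagates None up, which the top level turns into "NOPE".
--     Recursion depth is O(log n), so it scales to large lists."""
--
--     def seg(names, base):
--         n = len(names)
--         if n == 0:
--             return ""
--         if n == 1:
--             name = names[0]
--             if not isinstance(name, str):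
--                 return None
--             return "DOC " + str(base + 1) + ": " + name + "\n"
--         mid = n // 2
--         left = seg(names[:mid], base)
--         if left is None:
--             return None
--         right = seg(names[mid:], base + mid)
--         if right is None:
--             return None
--         return left + right
--
--     body = seg(doc_names, 0)
--     if body is None:
--         return "NOPE"
--     return "-" * 10 + "DOCUMENT NAMES" + "-" * 10 + "\n" + body
-- ===== Notes on version B (the rewrite author's own statement) =====
-- stated objective: alternative
-- what changed: A's forward index loop with a growing accumulator is replaced by a balanced divide-and-conquer recursion: the body of a segment is the concatenation of the recursively built bodies of its two halves, with a non-string propagated up as None instead of an early return.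
import Mathlib
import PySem

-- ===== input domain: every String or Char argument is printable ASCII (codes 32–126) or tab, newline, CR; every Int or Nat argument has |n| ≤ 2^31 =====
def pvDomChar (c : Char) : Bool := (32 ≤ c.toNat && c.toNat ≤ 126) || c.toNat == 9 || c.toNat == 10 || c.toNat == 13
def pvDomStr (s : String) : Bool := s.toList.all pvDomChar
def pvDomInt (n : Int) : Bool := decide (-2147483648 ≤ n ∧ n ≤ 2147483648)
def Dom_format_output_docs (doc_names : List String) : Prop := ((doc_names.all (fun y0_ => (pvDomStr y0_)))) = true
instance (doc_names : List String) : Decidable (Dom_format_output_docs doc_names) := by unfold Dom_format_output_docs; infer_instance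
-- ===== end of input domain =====

-- B replaces A's forward index loop (accumulator grown by +=) with a structural recursion
-- that builds the body by balanced divide-and-conquer over list segments
-- (objective: alternative decomposition, same cost).

-- ===== PORT A =====
-- The `isinstance(doc_name, str)` check is always true under the List String typing, so the
-- "NOPE" branch is unreachable and the else-branch body is what the loop performs.
def format_output_docs (doc_names : List String) : String :=
  (PySem.List.pyRange 0 doc_names.length 1).foldl
    (fun out_string i =>
      let doc_name := PySem.List.pyGetD doc_names i ""
      out_string ++ "DOC " ++ PySem.Int.toStr (i + 1) ++ ": " ++ doc_name ++ "\n")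
    "----------DOCUMENT NAMES----------\n"

-- ===== PORT B =====
-- B's inner `seg(names, base)` helper: Option String mirrors its None-on-non-string protocol
-- (the None branch is unreachable under List String typing, as in port A).
-- `names[:mid]` / `names[mid:]` with 0 <= mid <= len(names) are exactly List.take / List.drop
-- (PySem bridge lemmas slice_to / slice_from); `names[0]` with n = 1 is in range, so pyGetD is exact.
def pvSegB (names : List String) (base : Int) : Option String :=
  if h0 : names.length = 0 then some ""
  else if h1 : names.length = 1 then
    let name := PySem.List.pyGetD names 0 ""
    some ("DOC " ++ PySem.Int.toStr (base + 1) ++ ": " ++ name ++ "\n")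
  else
    let mid := names.length / 2
    match pvSegB (names.take mid) base with
    | none => none
    | some left =>
      match pvSegB (names.drop mid) (base + (mid : Int)) with
      | none => none
      | some right => some (left ++ right)
termination_by names.length
decreasing_by
  · simp only [List.length_take]; omega
  · simp only [List.length_drop]; omega

def format_output_docs_alt (doc_names : List String) : String :=
  match pvSegB doc_names 0 with
  | none => "NOPE"
  | some body => "----------DOCUMENT NAMES----------\n" ++ body

-- ===== PRECONDITION & SPEC =====
def Spec_format_output_docs (doc_names : List String) (out : String) : Prop := out = format_output_docs_alt doc_names
instance (doc_names : List String) (out : String) : Decidable (Spec_format_output_docs doc_names out) := by unfold Spec_format_output_docs; infer_instance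

-- ===== CLAIM (what is proved, stated in full; the proofs are below) =====
def Claim_equal_format_output_docs : Prop := ∀ (doc_names : List String), Dom_format_output_docs doc_names → Spec_format_output_docs doc_names (format_output_docs doc_names)

-- ===== LEMMAS AND PROOFS =====

-- Proof-side plain recursion: the body string B builds (pvSegB never yields none).
def pvBody (names : List String) (i : Int) : String :=
  match names with
  | [] => ""
  | head :: rest => "DOC " ++ PySem.Int.toStr i ++ ": " ++ head ++ "\n" ++ pvBody rest (i + 1)

lemma pvBody_append (xs ys : List String) (i : Int) :
    pvBody (xs ++ ys) i = pvBody xs i ++ pvBody ys (i + xs.length) := by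
  induction xs generalizing i with
  | nil => simp [pvBody]
  | cons x xs ih =>
    have hidx : i + 1 + (xs.length : Int) = i + (xs.length + 1) := by ring
    simp only [List.cons_append, pvBody, ih, hidx]
    apply String.toList_inj.mp
    simp [List.append_assoc]

lemma pvSegB_eq_aux : ∀ (n : Nat) (names : List String), names.length ≤ n → ∀ (base : Int), pvSegB names base = some (pvBody names (base + 1)) := by
  intro n
  induction n with
  | zero =>
    intro names h base
    have hnil : names = [] := List.length_eq_zero_iff.mp (Nat.le_zero.mp h)
    subst hnil; simp [pvSegB, pvBody]
  | succ n ih =>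
    intro names hle base
    by_cases h0 : names.length = 0
    · have hnil : names = [] := List.length_eq_zero_iff.mp h0
      subst hnil; simp [pvSegB, pvBody]
    · by_cases h1 : names.length = 1
      · obtain ⟨a, ha⟩ := List.length_eq_one_iff.mp h1
        subst ha
        simp [pvSegB, pvBody, PySem.List.pyGetD, PySem.List.pyGet?, PySem.List.pyIdx?]
      · have hmid : names.length / 2 ≤ names.length := Nat.div_le_self _ _
        have hl := ih (names.take (names.length / 2)) (by simp [List.length_take]; omega) base
        have hr := ih (names.drop (names.length / 2)) (by simp [List.length_drop]; omega)
          (base + ((names.length / 2 : Nat) : Int))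
        rw [pvSegB, dif_neg h0, dif_neg h1]
        simp only [hl, hr]
        have hsplit : pvBody names (base + 1)
            = pvBody (names.take (names.length / 2)) (base + 1)
              ++ pvBody (names.drop (names.length / 2)) (base + 1 + ((names.length / 2 : Nat) : Int)) := by
          conv_lhs => rw [← List.take_append_drop (names.length / 2) names]
          rw [pvBody_append, List.length_take, Nat.min_eq_left hmid]
        rw [show base + ((names.length / 2 : Nat) : Int) + 1
              = base + 1 + ((names.length / 2 : Nat) : Int) from by ring]
        exact congrArg some hsplit.symm

lemma pvSegB_eq (names : List String) (base : Int) :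
    pvSegB names base = some (pvBody names (base + 1)) :=
  pvSegB_eq_aux names.length names le_rfl base

lemma pv_loop_eq (xs : List String) (s : Int) (acc : String) :
    (PySem.List.enumerate xs s).foldl
      (fun out p => out ++ "DOC " ++ PySem.Int.toStr (p.1 + 1) ++ ": " ++ p.2 ++ "\n") acc
    = acc ++ pvBody xs (s + 1) := by
  induction xs generalizing s acc with
  | nil => simp [PySem.List.enumerate_nil, pvBody]
  | cons x xs ih =>
    rw [PySem.List.enumerate_cons, List.foldl_cons, ih]
    apply String.toList_inj.mp
    simp [pvBody, List.append_assoc, add_assoc]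

-- ===== VERDICT (by name: the statement is the Claim_ definition above) =====
theorem format_output_docs_spec : Claim_equal_format_output_docs := by
  intro doc_names _
  unfold Spec_format_output_docs format_output_docs format_output_docs_alt
  rw [pvSegB_eq]
  have hA : (PySem.List.pyRange 0 doc_names.length 1).foldl
      (fun out_string i =>
        let doc_name := PySem.List.pyGetD doc_names i ""
        out_string ++ "DOC " ++ PySem.Int.toStr (i + 1) ++ ": " ++ doc_name ++ "\n")
      "----------DOCUMENT NAMES----------\n"
    = (PySem.List.enumerate doc_names 0).foldl
        (fun out p => out ++ "DOC " ++ PySem.Int.toStr (p.1 + 1) ++ ": " ++ p.2 ++ "\n")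
        "----------DOCUMENT NAMES----------\n" := by
    rw [PySem.List.enumerate_eq_map_pyRange _ "", List.foldl_map]
    rfl
  rw [hA, pv_loop_eq]
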